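-- pv_equiv track=rewrite | github.com/BOUROUIS-MOHAMED/monclub_access_python | app/api/local_access_api_v2.py | _match_pattern
-- ===== SOURCE A (Python) =====
-- from typing import Any, Callable, Dict, List, Optional, Tuple
--
-- def _match_pattern(pattern: str, path: str) -> Optional[Dict[str, str]]:
--     p_parts = [p for p in pattern.split("/") if p]
--     u_parts = [p for p in path.split("/") if p]
--     if len(p_parts) != len(u_parts):
--         return None
--     params: Dict[str, str] = {}
--     for pp, up in zip(p_parts, u_parts):
--         if pp.startswith("{") and pp.endswith("}"):
--             params[pp[1:-1]] = up
--         elif pp != up: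
--             return None
--     return params
-- ===== SOURCE B (Python) =====
-- def _match_pattern(pattern, path):
--     def go(ps, us):
--         if not ps and not us:
--             return []
--         if not ps or not us:
--             return None
--         pp, up = ps[0], us[0]
--         if pp.startswith("{") and pp.endswith("}"):
--             rest = go(ps[1:], us[1:])
--             return None if rest is None else [(pp[1:-1], up)] + rest
--         if pp != up:
--             return None
--         return go(ps[1:], us[1:])
--     r = go([p for p in pattern.split("/") if p],
--            [p for p in path.split("/") if p])
--     return None if r is None else dict(r)
-- ===== Notes on version B (the rewrite author's own statement) =====
-- stated objective: alternative
-- what changed: Replaces A's upfront length check plus imperative zip-loop that mutates a dict with a recursive Option-returning matcher over the two segment lists (length mismatch falls out of the recursion) that collects (name, value) pairs and builds the dict once at the end.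
import Mathlib
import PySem

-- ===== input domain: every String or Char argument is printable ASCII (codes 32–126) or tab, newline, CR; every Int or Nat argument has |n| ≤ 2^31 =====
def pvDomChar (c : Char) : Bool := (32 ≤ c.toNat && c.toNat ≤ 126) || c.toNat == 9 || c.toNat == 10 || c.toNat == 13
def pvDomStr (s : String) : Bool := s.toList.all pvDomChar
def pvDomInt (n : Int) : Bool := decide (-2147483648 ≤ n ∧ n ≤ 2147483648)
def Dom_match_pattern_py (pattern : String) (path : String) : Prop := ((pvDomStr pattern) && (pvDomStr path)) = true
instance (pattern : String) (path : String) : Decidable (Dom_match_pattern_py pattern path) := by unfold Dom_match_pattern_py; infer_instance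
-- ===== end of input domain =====

-- ===== PORT A =====
-- B differs from A only in return value construction strategy; neither Python mutates its arguments.
-- shared split step: both sources contain the identical line "[p for p in s.split('/') if p]"
def pvSegs (s : String) : List String :=
  ((PySem.Str.split? s "/").getD []).filter (fun p => p != "")

-- A's for-loop over zip(p_parts, u_parts) carrying the params dict; none = the early "return None"
def pvLoopA : List (String × String) → PySem.Dict String String → Option (PySem.Dict String String)
  | [], params => some params
  | (pp, up) :: rest, params =>
    if PySem.Str.startswith pp "{" && PySem.Str.endswith pp "}" then
      pvLoopA rest (params.insert (PySem.Str.slice pp (some 1) (some (-1))) up)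
    else if pp ≠ up then none
    else pvLoopA rest params

def match_pattern_py (pattern : String) (path : String) : Option (List (String × String)) :=
  let p_parts := pvSegs pattern
  let u_parts := pvSegs path
  if p_parts.length ≠ u_parts.length then none
  else (pvLoopA (p_parts.zip u_parts) PySem.Dict.empty).map (fun d => d.items)

-- ===== PORT B =====
-- B's recursive matcher: walks both segment lists together, collects (name, value) pairs
def pvGoB : List String → List String → Option (List (String × String))
  | [], [] => some []
  | [], _ :: _ => none
  | _ :: _, [] => none
  | pp :: ps, up :: us =>
    if PySem.Str.startswith pp "{" && PySem.Str.endswith pp "}" then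
      (pvGoB ps us).map (fun rest => (PySem.Str.slice pp (some 1) (some (-1)), up) :: rest)
    else if pp ≠ up then none
    else pvGoB ps us

def match_pattern_py_alt (pattern : String) (path : String) : Option (List (String × String)) :=
  (pvGoB (pvSegs pattern) (pvSegs path)).map (fun r => (PySem.Dict.ofList r).items)

-- ===== PRECONDITION & SPEC =====
def Spec_match_pattern_py (pattern : String) (path : String) (out : Option (List (String × String))) : Prop := out = match_pattern_py_alt pattern path
instance (pattern : String) (path : String) (out : Option (List (String × String))) : Decidable (Spec_match_pattern_py pattern path out) := by unfold Spec_match_pattern_py; infer_instance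

-- ===== CLAIM (what is proved, stated in full; the proofs are below) =====
def Claim_equal_match_pattern_py : Prop := ∀ (pattern : String) (path : String), Dom_match_pattern_py pattern path → Spec_match_pattern_py pattern path (match_pattern_py pattern path)

-- ===== LEMMAS AND PROOFS =====

theorem pvGoB_none_of_length_ne : ∀ (ps us : List String), ps.length ≠ us.length → pvGoB ps us = none := by
  intro ps
  induction ps with
  | nil => intro us h; cases us with
    | nil => simp at h
    | cons u us => simp [pvGoB]
  | cons pp ps ih =>
    intro us h
    cases us with
    | nil => simp [pvGoB]
    | cons up us =>
      have h' : ps.length ≠ us.length := by simpa using h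
      simp [pvGoB, ih us h']

theorem pvLoopA_eq_map_update :
    ∀ (ps us : List String), ps.length = us.length → ∀ (d : PySem.Dict String String),
      pvLoopA (ps.zip us) d = (pvGoB ps us).map (fun r => PySem.Dict.update d r) := by
  intro ps
  induction ps with
  | nil =>
    intro us h d
    cases us with
    | nil => simp [pvLoopA, pvGoB, PySem.Dict.update]
    | cons u us => simp at h
  | cons pp ps ih =>
    intro us h d
    cases us with
    | nil => simp at h
    | cons up us =>
      have h' : ps.length = us.length := by simpa using h
      by_cases hp : (PySem.Str.startswith pp "{" && PySem.Str.endswith pp "}") = true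
      · simp only [List.zip_cons_cons, pvLoopA, pvGoB, hp, if_true]
        rw [ih us h']
        cases pvGoB ps us with
        | none => rfl
        | some r => rfl
      · simp only [List.zip_cons_cons, pvLoopA, pvGoB, hp, if_false, Bool.false_eq_true]
        by_cases he : pp = up
        · simp only [he, ne_eq, not_true_eq_false, if_false]
          exact ih us h' d
        · simp [he]

-- ===== VERDICT (by name: the statement is the Claim_ definition above) =====
theorem match_pattern_py_spec : Claim_equal_match_pattern_py := by
  intro pattern path _
  unfold Spec_match_pattern_py match_pattern_py match_pattern_py_alt
  by_cases hl : (pvSegs pattern).length = (pvSegs path).length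
  · simp only [hl, ne_eq, not_true_eq_false, if_false,
      pvLoopA_eq_map_update _ _ hl PySem.Dict.empty, Option.map_map]
    rfl
  · simp [hl, pvGoB_none_of_length_ne _ _ hl]
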